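-- pv_equiv track=rewrite | github.com/paiml/depyler | examples/hard_tribonacci.py | n_step_sum
-- ===== SOURCE A (Python) =====
-- def n_step_sum(n: int, steps: int) -> int:
--     """Generalized n-step number: sum of previous 'steps' values.
--
--     Base: first (steps-1) values are 0, the steps-th is 1.
--     """
--     if n < steps:
--         return 0
--     if n == steps:
--         return 1
--     dp: list[int] = [0] * (n + 1)
--     dp[steps] = 1
--     i: int = steps + 1
--     while i <= n:
--         total: int = 0
--         j: int = 1
--         while j <= steps and i - j >= 0:
--             total = total + dp[i - j]
--             j = j + 1
--         dp[i] = total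
--         i = i + 1
--     return dp[n]
-- ===== SOURCE B (Python) =====
-- def n_step_sum(n: int, steps: int) -> int:
--     """Generalized n-step number via the telescoped doubling recurrence
--     f(i) = 2*f(i-1) - f(i-1-steps), one recurrence step per index."""
--     if n < steps:
--         return 0
--     if n == steps:
--         return 1
--     vals = [1, 1]  # vals[k] = f(steps + k); f(steps) = 1, f(steps+1) = 1
--     for i in range(steps + 2, n + 1):
--         t = i - 1 - 2 * steps        # index of f(i-1-steps) in vals
--         sub = vals[t] if t >= 0 else 0   # values below index 'steps' are 0
--         vals.append(2 * vals[-1] - sub)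
--     return vals[-1]
-- ===== Notes on version B (the rewrite author's own statement) =====
-- stated objective: alternative
-- what changed: B replaces A's inner window-summing loop by the telescoped doubling recurrence f(i) = 2*f(i-1) - f(i-1-steps) over an append-only value list, one recurrence step per index instead of a steps-long inner scan (O(n) vs O(n*steps) arithmetic operations; intended as faster, but measurements vary at huge sizes where both manipulate very large integers, so no speed claim is made).
-- outside the precondition, e.g. on n_step_sum(2, 0): A returns 0, B returns 1; on n_step_sum(0, -1): A returns 0, B returns 1
import Mathlib
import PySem

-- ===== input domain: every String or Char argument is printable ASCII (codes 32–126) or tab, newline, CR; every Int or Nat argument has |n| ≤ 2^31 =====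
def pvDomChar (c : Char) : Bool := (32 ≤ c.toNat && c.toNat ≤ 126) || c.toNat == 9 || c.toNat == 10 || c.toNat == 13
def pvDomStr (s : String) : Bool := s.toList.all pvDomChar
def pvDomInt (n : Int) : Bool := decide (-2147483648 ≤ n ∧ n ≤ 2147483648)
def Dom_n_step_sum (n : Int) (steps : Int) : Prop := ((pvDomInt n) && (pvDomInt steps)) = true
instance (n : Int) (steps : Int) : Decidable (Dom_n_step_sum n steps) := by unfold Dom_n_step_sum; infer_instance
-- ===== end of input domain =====

-- B replaces A's inner window-summing loop by the telescoped doubling recurrence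
-- f(i) = 2*f(i-1) - f(i-1-steps) over an append-only list (objective: alternative).


-- ===== PORT A =====
-- inner 'while j <= steps and i - j >= 0' loop; fuel = steps.toNat bounds the iterations
-- (inside Pre_ the loop exits by its own condition before fuel runs out).
def nssAInner (dp : List Int) (i : Int) (steps : Int) (total : Int) (j : Int) : Nat → Int
  | 0 => total
  | fuel + 1 =>
    if j ≤ steps ∧ i - j ≥ 0 then
      nssAInner dp i steps (total + PySem.List.pyGetD dp (i - j) 0) (j + 1) fuel
    else total

-- outer 'while i <= n' loop; fuel = (n - steps).toNat bounds the iterations.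
def nssAOuter (n : Int) (steps : Int) (dp : List Int) (i : Int) : Nat → List Int
  | 0 => dp
  | fuel + 1 =>
    if i ≤ n then
      nssAOuter n steps (PySem.List.pySetD dp i (nssAInner dp i steps 0 1 steps.toNat)) (i + 1) fuel
    else dp

def n_step_sum (n : Int) (steps : Int) : Int :=
  if n < steps then 0
  else if n = steps then 1
  else
    let dp := List.replicate (n + 1).toNat 0
    let dp := PySem.List.pySetD dp steps 1          -- dp[steps] = 1 (in range inside Pre_)
    let dp := nssAOuter n steps dp (steps + 1) (n - steps).toNat
    PySem.List.pyGetD dp n 0                        -- return dp[n]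

-- ===== PORT B =====
-- 'for i in range(steps + 2, n + 1)' loop; fuel = length of the range.
def nssBLoop (steps : Int) (vals : List Int) (i : Int) : Nat → List Int
  | 0 => vals
  | fuel + 1 =>
    let t := i - 1 - 2 * steps
    let sub := if t ≥ 0 then PySem.List.pyGetD vals t 0 else 0
    nssBLoop steps (vals ++ [2 * PySem.List.pyGetD vals (-1) 0 - sub]) (i + 1) fuel

def n_step_sum_alt (n : Int) (steps : Int) : Int :=
  if n < steps then 0
  else if n = steps then 1
  else
    let vals := nssBLoop steps [1, 1] (steps + 2) (n + 1 - (steps + 2)).toNat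
    PySem.List.pyGetD vals (-1) 0                   -- return vals[-1]

-- ===== PRECONDITION & SPEC =====
-- Pre_ excludes steps ≤ 0 with n > steps (non-positive window sizes, outside the function's
-- purpose): there A returns 0 through accidental negative-index wraparound or raises
-- IndexError, while B's recurrence naturally returns a different value or raises.
def Pre_n_step_sum (n : Int) (steps : Int) : Prop := 1 ≤ steps ∨ n ≤ steps
instance (n : Int) (steps : Int) : Decidable (Pre_n_step_sum n steps) := by
  unfold Pre_n_step_sum; infer_instance

def pvWitness_n_step_sum : Int × Int := (7, 3)

def Spec_n_step_sum (n : Int) (steps : Int) (out : Int) : Prop := out = n_step_sum_alt n steps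
instance (n : Int) (steps : Int) (out : Int) : Decidable (Spec_n_step_sum n steps out) := by unfold Spec_n_step_sum; infer_instance

-- ===== CLAIM (what is proved, stated in full; the proofs are below) =====
def Claim_equal_n_step_sum : Prop := ∀ (n : Int) (steps : Int), Dom_n_step_sum n steps → Pre_n_step_sum n steps → Spec_n_step_sum n steps (n_step_sum n steps)

-- ===== LEMMAS AND PROOFS =====

-- Reference sequence: nssHist S k = [f k, f (k-1), ..., f 0] where f is the S-step sequence
-- (first S values 0 except f S = 1, afterwards the sum of the previous S values).
def nssHist (S : Nat) : Nat → List Int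
  | 0 => [if S = 0 then 1 else 0]
  | k + 1 =>
    (if k + 1 < S then 0 else if k + 1 = S then 1 else ((nssHist S k).take S).sum) :: nssHist S k

def nssF (S : Nat) (k : Nat) : Int := (nssHist S k).headI

theorem nssHist_succ (S k : Nat) : nssHist S (k + 1)
    = (if k + 1 < S then 0 else if k + 1 = S then 1 else ((nssHist S k).take S).sum) :: nssHist S k := rfl

theorem nssF_lt (S k : Nat) (h : k < S) : nssF S k = 0 := by
  cases k with
  | zero => simp only [nssF, nssHist, List.headI]; rw [if_neg (by omega)]
  | succ k => simp only [nssF, nssHist_succ, List.headI]; rw [if_pos h]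

theorem nssF_self (S : Nat) (hS : 1 ≤ S) : nssF S S = 1 := by
  obtain ⟨s, rfl⟩ : ∃ s, S = s + 1 := ⟨S - 1, by omega⟩
  simp only [nssF, nssHist_succ, List.headI]
  rw [if_neg (by omega)]
  simp

theorem nssF_gt (S k : Nat) (h : S < k) : nssF S k = ((nssHist S (k - 1)).take S).sum := by
  obtain ⟨k', rfl⟩ : ∃ k', k = k' + 1 := ⟨k - 1, by omega⟩
  simp only [nssF, nssHist_succ, List.headI, Nat.add_sub_cancel]
  rw [if_neg (by omega), if_neg (by omega)]

theorem nssHist_eq_map (S k : Nat) :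
    nssHist S k = (List.range (k + 1)).map (fun j => nssF S (k - j)) := by
  induction k with
  | zero => simp [nssHist, nssF, List.headI]
  | succ k ih =>
    rw [List.range_succ_eq_map, List.map_cons, List.map_map]
    have h1 : (fun j => nssF S (k + 1 - j)) ∘ Nat.succ = fun j => nssF S (k - j) := by
      funext j; simp only [Function.comp]; congr 1; omega
    rw [h1, ← ih, Nat.sub_zero]
    show nssHist S (k + 1) = nssF S (k + 1) :: nssHist S k
    rw [nssHist_succ]; rfl

theorem nssSum_map_range (g : Nat → Int) (r : Nat) :
    ((List.range r).map g).sum = ∑ j ∈ Finset.range r, g j := by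
  induction r with
  | zero => simp
  | succ r ih => rw [List.range_succ, List.map_append, List.sum_append, Finset.sum_range_succ, ih]; simp

-- window sum of the S values below index m (inclusive)
def nssW (S m : Nat) : Int := ∑ j ∈ Finset.range S, nssF S (m - j)

theorem nssF_gt' (S k : Nat) (hk : S < k) : nssF S k = nssW S (k - 1) := by
  rw [nssF_gt S k hk, nssHist_eq_map, ← List.map_take, List.take_range,
      show min S (k - 1 + 1) = S by omega, nssSum_map_range]
  rfl

theorem nssW_succ (S m : Nat) (hS : 1 ≤ S) (hm : S ≤ m) :
    nssW S m = nssW S (m - 1) + nssF S m - nssF S (m - S) := by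
  obtain ⟨s, rfl⟩ : ∃ s, S = s + 1 := ⟨S - 1, by omega⟩
  have h1 : nssW (s + 1) m = (∑ j ∈ Finset.range s, nssF (s + 1) (m - (j + 1))) + nssF (s + 1) m := by
    simpa using Finset.sum_range_succ' (fun j => nssF (s + 1) (m - j)) s
  have h2 : nssW (s + 1) (m - 1)
      = (∑ j ∈ Finset.range s, nssF (s + 1) (m - 1 - j)) + nssF (s + 1) (m - 1 - s) :=
    Finset.sum_range_succ _ s
  have he : (∑ j ∈ Finset.range s, nssF (s + 1) (m - (j + 1)))
      = ∑ j ∈ Finset.range s, nssF (s + 1) (m - 1 - j) :=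
    Finset.sum_congr rfl (by intro j _; congr 1; omega)
  rw [show m - (s + 1) = m - 1 - s by omega]
  rw [he] at h1; linarith

theorem nssKey (S m : Nat) (hS : 1 ≤ S) (hm : 2 ≤ m) :
    nssF S (S + m) = 2 * nssF S (S + m - 1) - nssF S (m - 1) := by
  have h1 : nssF S (S + m) = nssW S (S + m - 1) := nssF_gt' _ _ (by omega)
  have h2 : nssF S (S + m - 1) = nssW S (S + m - 2) := by
    have h := nssF_gt' S (S + m - 1) (by omega)
    rwa [show S + m - 1 - 1 = S + m - 2 by omega] at h
  have h3 := nssW_succ S (S + m - 1) hS (by omega)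
  rw [show S + m - 1 - 1 = S + m - 2 by omega, show S + m - 1 - S = m - 1 by omega] at h3
  linarith

theorem nssF_succ_self (S : Nat) (hS : 1 ≤ S) : nssF S (S + 1) = 1 := by
  rw [nssF_gt' S (S + 1) (by omega), show S + 1 - 1 = S from rfl]
  obtain ⟨s, rfl⟩ : ∃ s, S = s + 1 := ⟨S - 1, by omega⟩
  unfold nssW
  rw [Finset.sum_range_succ' (fun j => nssF (s + 1) (s + 1 - j)) s]
  have hz : (∑ j ∈ Finset.range s, nssF (s + 1) (s + 1 - (j + 1))) = 0 :=
    Finset.sum_eq_zero (by intro j hj; exact nssF_lt _ _ (by omega))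
  rw [hz, Nat.sub_zero, nssF_self _ (by omega)]
  ring

-- ----- A-side -----

-- dp after the first i cells have received their final value
def nssDp (S N i : Nat) : List Int :=
  (List.range i).map (nssF S) ++ List.replicate (N + 1 - i) 0

theorem nssDp_getD (S N i k : Nat) (hk : k < i) : (nssDp S N i).getD k 0 = nssF S k := by
  unfold nssDp List.getD
  rw [List.getElem?_append_left (by simpa using hk)]
  simp [hk]

theorem nssSet_append (l : List Int) (x v : Int) (r : List Int) (n : Nat) (h : n = l.length) :
    (l ++ x :: r).set n v = l ++ v :: r := by
  subst h
  induction l with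
  | nil => rfl
  | cons a l ih => simp [ih]

theorem nssAInner_eq (S N i : Nat) (hSi : S + 1 ≤ i) (_hiN : i ≤ N + 1) :
    ∀ (fuel j : Nat) (total : Int), 1 ≤ j → j + fuel = S + 1 →
      nssAInner (nssDp S N i) (i : Int) (S : Int) total (j : Int) fuel
        = total + ∑ t ∈ Finset.range fuel, nssF S (i - (j + t)) := by
  intro fuel
  induction fuel with
  | zero => intro j total h1 h2; simp [nssAInner]
  | succ fuel ih =>
    intro j total h1 h2
    rw [nssAInner, if_pos (by constructor <;> omega)]
    have hc : (i : Int) - (j : Int) = ((i - j : Nat) : Int) := by omega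
    rw [hc, PySem.List.pyGetD_natCast, nssDp_getD S N i (i - j) (by omega)]
    have hc2 : (j : Int) + 1 = ((j + 1 : Nat) : Int) := by omega
    rw [hc2, ih (j + 1) _ (by omega) (by omega)]
    rw [Finset.sum_range_succ' (fun t => nssF S (i - (j + t))) fuel]
    have he : (∑ t ∈ Finset.range fuel, nssF S (i - (j + 1 + t)))
        = ∑ t ∈ Finset.range fuel, nssF S (i - (j + (t + 1))) :=
      Finset.sum_congr rfl (by intro t _; congr 1; omega)
    rw [he, Nat.add_zero]
    ring

theorem nssAInner_val (S N i : Nat) (_hS : 1 ≤ S) (hSi : S + 1 ≤ i) (hiN : i ≤ N + 1) :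
    nssAInner (nssDp S N i) (i : Int) (S : Int) 0 1 S = nssF S i := by
  have h := nssAInner_eq S N i hSi hiN S 1 0 (le_refl 1) (by omega)
  rw [show ((1 : Nat) : Int) = (1 : Int) from rfl] at h
  rw [h, zero_add]
  have he : (∑ t ∈ Finset.range S, nssF S (i - (1 + t)))
      = ∑ t ∈ Finset.range S, nssF S (i - 1 - t) :=
    Finset.sum_congr rfl (by intro t _; congr 1; omega)
  rw [he, ← nssW, ← nssF_gt' S i (by omega)]

theorem nssAOuter_eq (S N : Nat) (hS : 1 ≤ S) :
    ∀ (fuel i : Nat), S + 1 ≤ i → i + fuel = N + 1 →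
      nssAOuter (N : Int) (S : Int) (nssDp S N i) (i : Int) fuel = nssDp S N (N + 1) := by
  intro fuel
  induction fuel with
  | zero =>
    intro i h1 h2
    have : i = N + 1 := by omega
    subst this; rfl
  | succ fuel ih =>
    intro i h1 h2
    rw [nssAOuter, if_pos (by omega : (i : Int) ≤ (N : Int))]
    rw [show ((S : Int)).toNat = S from Int.toNat_natCast S]
    rw [nssAInner_val S N i hS h1 (by omega)]
    have hset : PySem.List.pySetD (nssDp S N i) (i : Int) (nssF S i) = nssDp S N (i + 1) := by
      rw [PySem.List.pySetD_natCast]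
      unfold nssDp
      rw [show N + 1 - i = (N - i) + 1 by omega, List.replicate_succ]
      rw [nssSet_append _ _ _ _ i (by simp)]
      rw [List.range_succ, List.map_append]
      simp [show N + 1 - (i + 1) = N - i by omega]
    rw [hset]
    have hc : (i : Int) + 1 = ((i + 1 : Nat) : Int) := by omega
    rw [hc]
    exact ih (i + 1) (by omega) (by omega)

theorem nssMapRange_zero (S : Nat) : (List.range S).map (nssF S) = List.replicate S 0 := by
  rw [List.eq_replicate_iff]
  constructor
  · simp
  · intro b hb
    simp only [List.mem_map, List.mem_range] at hb
    obtain ⟨k, hk, rfl⟩ := hb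
    exact nssF_lt S k hk

theorem nssA_main (S N : Nat) (hS : 1 ≤ S) (hSN : S < N) :
    n_step_sum (N : Int) (S : Int) = nssF S N := by
  unfold n_step_sum
  rw [if_neg (by omega), if_neg (by omega)]
  show PySem.List.pyGetD
      (nssAOuter (N : Int) (S : Int)
        (PySem.List.pySetD (List.replicate ((N : Int) + 1).toNat 0) (S : Int) 1)
        ((S : Int) + 1) ((N : Int) - (S : Int)).toNat)
      (N : Int) 0 = nssF S N
  rw [show ((N : Int) + 1).toNat = N + 1 by omega]
  have e1 : PySem.List.pySetD (List.replicate (N + 1) (0 : Int)) (S : Int) 1 = nssDp S N (S + 1) := by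
    rw [PySem.List.pySetD_natCast]
    rw [show N + 1 = S + (N - S + 1) by omega, List.replicate_add, List.replicate_succ]
    rw [nssSet_append _ _ _ _ S (by simp)]
    unfold nssDp
    rw [List.range_succ, List.map_append, nssMapRange_zero]
    simp [nssF_self S hS, show N + 1 - (S + 1) = N - S by omega]
  rw [e1]
  rw [show ((N : Int) - (S : Int)).toNat = N - S by omega]
  rw [show (S : Int) + 1 = ((S + 1 : Nat) : Int) by omega]
  rw [nssAOuter_eq S N hS (N - S) (S + 1) (by omega) (by omega)]
  rw [PySem.List.pyGetD_natCast, nssDp_getD S N (N + 1) N (by omega)]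

-- ----- B-side -----

theorem nssBLoop_eq (S : Nat) (hS : 1 ≤ S) :
    ∀ (fuel m : Nat), 2 ≤ m →
      nssBLoop (S : Int) ((List.range m).map (fun k => nssF S (S + k))) ((S : Int) + (m : Int)) fuel
        = (List.range (m + fuel)).map (fun k => nssF S (S + k)) := by
  intro fuel
  induction fuel with
  | zero => intro m hm; rfl
  | succ fuel ih =>
    intro m hm
    obtain ⟨m', rfl⟩ : ∃ m', m = m' + 2 := ⟨m - 2, by omega⟩
    rw [nssBLoop]
    have hlast : PySem.List.pyGetD ((List.range (m' + 2)).map (fun k => nssF S (S + k))) (-1) 0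
        = nssF S (S + (m' + 1)) := by
      rw [List.range_succ, List.map_append]
      exact PySem.List.pyGetD_neg_one_append_singleton _ _ _
    have hsub : (if ((S : Int) + ((m' + 2 : Nat) : Int) - 1 - 2 * (S : Int) ≥ 0) then
          PySem.List.pyGetD ((List.range (m' + 2)).map (fun k => nssF S (S + k)))
            ((S : Int) + ((m' + 2 : Nat) : Int) - 1 - 2 * (S : Int)) 0
        else 0) = nssF S (m' + 1) := by
      by_cases hc : S ≤ m' + 1
      · rw [if_pos (by omega)]
        rw [show (S : Int) + ((m' + 2 : Nat) : Int) - 1 - 2 * (S : Int) = ((m' + 1 - S : Nat) : Int) by omega]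
        rw [PySem.List.pyGetD_natCast]
        have hlt : m' + 1 - S < m' + 2 := by omega
        unfold List.getD
        rw [List.getElem?_map, List.getElem?_range hlt]
        simp only [Option.map_some, Option.getD_some]
        congr 1; omega
      · rw [if_neg (by omega), nssF_lt S (m' + 1) (by omega)]
    simp only [ge_iff_le] at hsub
    rw [hlast, hsub]
    have happ : (List.range (m' + 2)).map (fun k => nssF S (S + k))
          ++ [2 * nssF S (S + (m' + 1)) - nssF S (m' + 1)]
        = (List.range (m' + 3)).map (fun k => nssF S (S + k)) := by
      rw [List.range_succ (n := m' + 2), List.map_append]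
      congr 1
      simp only [List.map_cons, List.map_nil]
      congr 1
      rw [nssKey S (m' + 2) hS (by omega), show S + (m' + 2) - 1 = S + (m' + 1) by omega,
          show m' + 2 - 1 = m' + 1 by omega]
    rw [happ]
    have hc2 : (S : Int) + ((m' + 2 : Nat) : Int) + 1 = (S : Int) + ((m' + 3 : Nat) : Int) := by omega
    rw [hc2, ih (m' + 3) (by omega), show m' + 3 + fuel = m' + 2 + (fuel + 1) by omega]

theorem nssB_main (S N : Nat) (hS : 1 ≤ S) (hSN : S < N) :
    n_step_sum_alt (N : Int) (S : Int) = nssF S N := by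
  unfold n_step_sum_alt
  rw [if_neg (by omega), if_neg (by omega)]
  show PySem.List.pyGetD
      (nssBLoop (S : Int) [1, 1] ((S : Int) + 2) ((N : Int) + 1 - ((S : Int) + 2)).toNat)
      (-1) 0 = nssF S N
  have h0 : [(1 : Int), 1] = (List.range 2).map (fun k => nssF S (S + k)) := by
    rw [show List.range 2 = [0, 1] from rfl]
    simp [nssF_self S hS, nssF_succ_self S hS]
  rw [h0]
  rw [show ((N : Int) + 1 - ((S : Int) + 2)).toNat = N - S - 1 by omega]
  rw [show (S : Int) + 2 = (S : Int) + ((2 : Nat) : Int) from rfl]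
  rw [nssBLoop_eq S hS (N - S - 1) 2 (by omega)]
  rw [show 2 + (N - S - 1) = (N - S) + 1 by omega]
  rw [List.range_succ, List.map_append]
  simp only [List.map_cons, List.map_nil]
  rw [PySem.List.pyGetD_neg_one_append_singleton]
  congr 1; omega

-- ===== VERDICT (by name: the statement is the Claim_ definition above) =====
theorem n_step_sum_spec : Claim_equal_n_step_sum := by
  unfold Claim_equal_n_step_sum
  intro n steps _ hpre
  unfold Spec_n_step_sum
  by_cases h1 : n < steps
  · simp [n_step_sum, n_step_sum_alt, h1]
  · by_cases h2 : n = steps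
    · simp [n_step_sum, n_step_sum_alt, h2]
    · have hs : 1 ≤ steps := by
        cases hpre with
        | inl h => exact h
        | inr h => omega
      have hn : steps < n := by omega
      obtain ⟨S, rfl⟩ : ∃ S : Nat, steps = (S : Int) := ⟨steps.toNat, by omega⟩
      obtain ⟨N, rfl⟩ : ∃ N : Nat, n = (N : Int) := ⟨n.toNat, by omega⟩
      rw [nssA_main S N (by omega) (by omega), nssB_main S N (by omega) (by omega)]
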